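-- pv_equiv track=rewrite | github.com/charlesfrye/AdventOfCode | 8/1.py | memCount
-- ===== SOURCE A (Python) =====
-- def memCount(line):
--     line = list(line.strip('"'))
--     sz = 0
--     while line != []:
--         char = line.pop(0)
--         sz += 1
--         if char == '\\':
--             if line == []:
--                 continue
--             nxt = line[0]
--             if nxt in ['\\','"']:
--                 del line[0]
--                 continue
--             elif nxt in ['x']:
--                 del line[0:3]
--     return sz
-- ===== SOURCE B (Python) =====
-- def memCount(line):
--     body = line.strip('"')
--     n = len(body)
--     i = 0
--     saved = 0
--     while True:
--         j = body.find('\\', i)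
--         if j == -1 or j == n - 1:
--             break
--         nxt = body[j + 1]
--         if nxt == '\\' or nxt == '"':
--             saved += 1
--             i = j + 2
--         elif nxt == 'x':
--             k = min(2, n - j - 2)
--             saved += 1 + k
--             i = j + 2 + k
--         else:
--             i = j + 1
--     return n - saved
-- ===== Notes on version B (the rewrite author's own statement) =====
-- stated objective: faster
-- what changed: Replaces A's destructive list simulation (pop(0)/del slices, quadratic from O(n) front pops) with a single str.find-driven scan over the immutable string that totals the characters saved by each escape and returns len(body) - saved.
import Mathlib
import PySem

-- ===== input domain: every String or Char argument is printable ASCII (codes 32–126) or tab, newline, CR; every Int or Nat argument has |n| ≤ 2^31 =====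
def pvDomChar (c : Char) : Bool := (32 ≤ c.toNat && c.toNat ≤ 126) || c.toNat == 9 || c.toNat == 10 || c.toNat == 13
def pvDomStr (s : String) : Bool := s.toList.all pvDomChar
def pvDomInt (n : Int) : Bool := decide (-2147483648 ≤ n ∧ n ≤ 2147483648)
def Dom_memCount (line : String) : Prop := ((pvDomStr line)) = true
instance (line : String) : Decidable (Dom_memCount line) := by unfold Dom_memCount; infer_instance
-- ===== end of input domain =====

-- B replaces A's quadratic pop(0)/del list mutation with a single str.find-driven
-- scan that subtracts the characters saved by escapes from the length (objective: faster).

-- ===== PORT A =====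
-- while line != []: pop(0), count, and on '\' consume the escape tail by deleting from the list
def aLoop : List Char → Int → Int
  | [], sz => sz
  | c :: rest, sz =>
    if c = '\\' then
      match h : rest with
      | [] => sz + 1                 -- continue; loop then exits with sz+1
      | nxt :: rtail =>
        if nxt = '\\' ∨ nxt = '"' then aLoop rtail (sz + 1)        -- del line[0]
        else if nxt = 'x' then aLoop (rest.drop 3) (sz + 1)        -- del line[0:3]
        else aLoop rest (sz + 1)
    else aLoop rest (sz + 1)
termination_by l _ => l.length
decreasing_by all_goals ((try subst h); simp only [List.length_cons, List.length_drop]; omega)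

def memCount (line : String) : Int :=
  aLoop (PySem.Chars.stripChars line.toList ['"']) 0

-- ===== PORT B =====
-- cited by bLoop's decreasing_by: str.find never returns an index below its start
theorem pvFind_ge (body : List Char) (i : Nat) (hi : i ≤ body.length)
    (hne : PySem.Chars.findFrom body ['\\'] (i : Int) ≠ -1) :
    i ≤ (PySem.Chars.findFrom body ['\\'] (i : Int)).toNat := by
  have h := (PySem.Chars.findFrom_natCast_spec body ['\\'] i hi hne).1
  omega

-- while True: j = body.find('\\', i); break on -1 or last; classify body[j+1], add savings, jump i
def bLoop (body : List Char) (i : Nat) (saved : Int) : Int :=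
  if hguard : body.length < i then saved  -- totality guard: find from i > len is -1 in Python
  else
    let n : Int := (body.length : Int)
    let j : Int := PySem.Chars.findFrom body ['\\'] (i : Int)
    if hj : j = -1 ∨ j = n - 1 then saved
    else
      match PySem.List.pyGet? body (j + 1) with
      | none => saved                 -- unreachable: j+1 is in range here
      | some nxt =>
        if nxt = '\\' ∨ nxt = '"' then bLoop body (j.toNat + 2) (saved + 1)
        else if nxt = 'x' then
          let k : Int := min 2 (n - j - 2)
          bLoop body (j.toNat + 2 + k.toNat) (saved + 1 + k)
        else bLoop body (j.toNat + 1) saved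
termination_by body.length + 1 - i
decreasing_by
  all_goals
    have h := pvFind_ge body i (Nat.le_of_not_lt hguard) (fun h => hj (Or.inl h))
    exact Nat.sub_lt_sub_left (by omega) (by omega)

def memCount_alt (line : String) : Int :=
  ((PySem.Chars.stripChars line.toList ['"']).length : Int)
    - bLoop (PySem.Chars.stripChars line.toList ['"']) 0 0

-- ===== PRECONDITION & SPEC =====
def Spec_memCount (line : String) (out : Int) : Prop := out = memCount_alt line
instance (line : String) (out : Int) : Decidable (Spec_memCount line out) := by unfold Spec_memCount; infer_instance

-- ===== CLAIM (what is proved, stated in full; the proofs are below) =====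
def Claim_equal_memCount : Prop := ∀ (line : String), Dom_memCount line → Spec_memCount line (memCount line)

-- ===== LEMMAS AND PROOFS =====

-- the decoded in-memory count of a stripped body, as a simple token recursion
def pvT : List Char → Int
  | [] => 0
  | c :: rest =>
    if c = '\\' then
      match h : rest with
      | [] => 1
      | nxt :: rtail =>
        if nxt = '\\' ∨ nxt = '"' then 1 + pvT rtail
        else if nxt = 'x' then 1 + pvT (rtail.drop 2)
        else 1 + pvT rest
    else 1 + pvT rest
termination_by l => l.length
decreasing_by all_goals ((try subst h); simp [List.length_drop]; (try omega))

theorem pvT_nil : pvT [] = 0 := by rw [pvT.eq_def]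

theorem pvT_cons_ne {c : Char} (l : List Char) (h : c ≠ '\\') : pvT (c :: l) = 1 + pvT l := by
  rw [pvT.eq_def]; simp [h]

theorem pvT_bs_nil : pvT ['\\'] = 1 := by rw [pvT.eq_def]; simp

theorem pvT_bs_esc {nxt : Char} (l : List Char) (h : nxt = '\\' ∨ nxt = '"') :
    pvT ('\\' :: nxt :: l) = 1 + pvT l := by
  rw [pvT.eq_def]; simp [h]

theorem pvT_bs_x (l : List Char) : pvT ('\\' :: 'x' :: l) = 1 + pvT (l.drop 2) := by
  rw [pvT.eq_def]; simp

theorem pvT_bs_other {nxt : Char} (l : List Char) (h1 : ¬(nxt = '\\' ∨ nxt = '"'))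
    (h2 : nxt ≠ 'x') : pvT ('\\' :: nxt :: l) = 1 + pvT (nxt :: l) := by
  rw [pvT.eq_def]; simp [h1, h2]

theorem aLoop_eq (l : List Char) (sz : Int) : aLoop l sz = sz + pvT l := by
  fun_induction aLoop l sz <;>
    simp_all [pvT_nil, pvT_bs_nil, pvT_bs_esc, pvT_bs_x, pvT_bs_other, pvT_cons_ne] <;>
    try ring

theorem pvT_append_free (p l : List Char) (h : '\\' ∉ p) :
    pvT (p ++ l) = (p.length : Int) + pvT l := by
  induction p with
  | nil => simp
  | cons c p ih =>
    have hc : c ≠ '\\' := fun hc => h (by simp [hc])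
    have hp := ih (fun hm => h (List.mem_cons_of_mem _ hm))
    rw [List.cons_append, pvT_cons_ne _ hc, hp]
    simp only [List.length_cons]; push_cast; ring

theorem pvT_free (l : List Char) (h : '\\' ∉ l) : pvT l = (l.length : Int) := by
  have := pvT_append_free l [] h
  simpa [pvT_nil] using this

theorem singleton_prefix_cons {a : Char} (l : List Char) : [a] <+: a :: l :=
  ⟨l, rfl⟩

theorem singleton_infix_of_mem {a : Char} {l : List Char} (h : a ∈ l) : [a] <:+: l := by
  obtain ⟨s, t, rfl⟩ := List.append_of_mem h
  exact ⟨s, t, by simp⟩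

theorem bs_free_take (body : List Char) (i j : Nat) (hj : j ≤ body.length)
    (hmin : ∀ m : Nat, i ≤ m → m < j → ¬ ['\\'] <+: body.drop m) :
    '\\' ∉ (body.drop i).take (j - i) := by
  intro hmem
  obtain ⟨t, ht, heq⟩ := List.getElem_of_mem hmem
  have htl : i + t < body.length := by
    have h2 : t < (body.drop i).length := lt_of_lt_of_le ht (by simp)
    simp at h2; omega
  have hval : body[i + t] = '\\' := by
    rw [List.getElem_take, List.getElem_drop] at heq
    exact heq
  have htj : i + t < j := by
    have := ht
    simp at this
    omega
  apply hmin (i + t) (by omega) htj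
  rw [List.drop_eq_getElem_cons htl, hval]
  exact singleton_prefix_cons _

theorem drop_decomp (body : List Char) (i j : Nat) (hij : i ≤ j) :
    body.drop i = (body.drop i).take (j - i) ++ body.drop j := by
  conv_lhs => rw [← List.take_append_drop (j - i) (body.drop i)]
  rw [List.drop_drop]
  congr 2
  omega

theorem bLoop_eq (body : List Char) :
    ∀ (m i : Nat) (saved : Int), body.length + 1 - i ≤ m → i ≤ body.length →
    bLoop body i saved = saved + ((body.drop i).length : Int) - pvT (body.drop i) := by
  intro m
  induction m with
  | zero => intro i saved hm hi; exact absurd hm (by omega)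
  | succ m ih =>
    intro i saved hm hi
    rw [bLoop]
    rw [dif_neg (by omega)]
    simp only []
    set j : Int := PySem.Chars.findFrom body ['\\'] (i : Int) with hjdef
    by_cases hj : j = -1 ∨ j = (body.length : Int) - 1
    · rw [dif_pos hj]
      rcases hj with hj | hj
      · -- no backslash from i on
        have hfree : ¬ ['\\'] <:+: body.drop i :=
          (PySem.Chars.findFrom_natCast_eq_neg_one_iff body ['\\'] i hi).1 hj
        have hnb : '\\' ∉ body.drop i := fun hm' => hfree (singleton_infix_of_mem hm')
        rw [pvT_free _ hnb]; ring
      · -- lone backslash at the very end, or empty body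
        by_cases hne : j = -1
        · have hfree : ¬ ['\\'] <:+: body.drop i :=
            (PySem.Chars.findFrom_natCast_eq_neg_one_iff body ['\\'] i hi).1 hne
          have hnb : '\\' ∉ body.drop i := fun hm' => hfree (singleton_infix_of_mem hm')
          rw [pvT_free _ hnb]; ring
        obtain ⟨hij, hpre, hmin⟩ := PySem.Chars.findFrom_natCast_spec body ['\\'] i hi hne
        have hlen : 1 ≤ body.length := by omega
        have hjn : j.toNat = body.length - 1 := by omega
        have hij' : i ≤ j.toNat := by omega
        have hdj : body.drop j.toNat = ['\\'] := by
          obtain ⟨s, hs⟩ := hpre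
          have hl : (body.drop j.toNat).length = 1 := by simp; omega
          rw [← hs] at hl ⊢
          simp at hl
          simp [hl]
        rw [drop_decomp body i j.toNat hij']
        have hfree := bs_free_take body i j.toNat (by omega) hmin
        rw [pvT_append_free _ _ hfree, hdj, pvT_bs_nil]
        simp
        try omega
    · rw [dif_neg hj]
      have hne : j ≠ -1 := fun h => hj (Or.inl h)
      obtain ⟨hij, hpre, hmin⟩ := PySem.Chars.findFrom_natCast_spec body ['\\'] i hi hne
      have hjlt : j.toNat < body.length := by
        obtain ⟨s, hs⟩ := hpre
        have h0 : 0 < (body.drop j.toNat).length := by rw [← hs]; simp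
        simp at h0; omega
      have hjlt' : j.toNat + 1 < body.length := by
        have hne2 : j ≠ (body.length : Int) - 1 := fun h => hj (Or.inr h)
        omega
      have hbj : body[j.toNat] = '\\' := by
        obtain ⟨s, hs⟩ := hpre
        rw [List.drop_eq_getElem_cons hjlt] at hs
        exact (List.cons_eq_cons.mp hs).1.symm
      have hget : PySem.List.pyGet? body (j + 1) = some body[j.toNat + 1] := by
        have hc : j + 1 = ((j.toNat + 1 : Nat) : Int) := by omega
        rw [hc, PySem.List.pyGet?_natCast, List.getElem?_eq_getElem hjlt']
      rw [hget]
      dsimp only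
      have hdj : body.drop j.toNat = '\\' :: body[j.toNat + 1] :: body.drop (j.toNat + 2) := by
        rw [List.drop_eq_getElem_cons hjlt, hbj]
        congr 1
        rw [List.drop_eq_getElem_cons hjlt']
      have hfree := bs_free_take body i j.toNat (by omega) hmin
      have hsplit := drop_decomp body i j.toNat (by omega)
      have hSav : ((body.drop i).length : Int) - pvT (body.drop i)
          = ((body.drop j.toNat).length : Int) - pvT (body.drop j.toNat) := by
        rw [hsplit, pvT_append_free _ _ hfree]
        simp
        try ring
      have hl1 : (body.drop i).length = body.length - i := by simp
      have hl2 : (body.drop j.toNat).length = body.length - j.toNat := by simp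
      by_cases h1 : body[j.toNat + 1] = '\\' ∨ body[j.toNat + 1] = '"'
      · rw [if_pos h1]
        have hT : pvT (body.drop j.toNat) = 1 + pvT (body.drop (j.toNat + 2)) := by
          rw [hdj, pvT_bs_esc _ h1]
        rw [ih (j.toNat + 2) (saved + 1) (by omega) (by omega)]
        have hl3 : (body.drop (j.toNat + 2)).length = body.length - (j.toNat + 2) := by simp
        omega
      · rw [if_neg h1]
        by_cases h2 : body[j.toNat + 1] = 'x'
        · rw [if_pos h2]
          set k : Int := min 2 ((body.length : Int) - j - 2) with hkdef
          have hk0 : 0 ≤ k := by omega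
          have hdk : (body.drop (j.toNat + 2)).drop 2 = body.drop (j.toNat + 2 + k.toNat) := by
            rw [List.drop_drop]
            rcases Nat.lt_or_ge body.length (j.toNat + 2 + 2) with hsmall | hbig
            · rw [List.drop_eq_nil_of_le (by omega),
                List.drop_eq_nil_of_le (by omega)]
            · congr 1; omega
          have hT : pvT (body.drop j.toNat) = 1 + pvT (body.drop (j.toNat + 2 + k.toNat)) := by
            rw [hdj, h2, pvT_bs_x, hdk]
          rw [ih (j.toNat + 2 + k.toNat) (saved + 1 + k) (by omega) (by omega)]
          have hl4 : (body.drop (j.toNat + 2 + k.toNat)).length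
              = body.length - (j.toNat + 2 + k.toNat) := by simp
          omega
        · rw [if_neg h2]
          have hT : pvT (body.drop j.toNat) = 1 + pvT (body.drop (j.toNat + 1)) := by
            rw [hdj, pvT_bs_other _ h1 h2]
            rw [List.drop_eq_getElem_cons hjlt']
          rw [ih (j.toNat + 1) saved (by omega) (by omega)]
          have hl5 : (body.drop (j.toNat + 1)).length = body.length - (j.toNat + 1) := by simp
          omega

-- ===== VERDICT (by name: the statement is the Claim_ definition above) =====
theorem memCount_spec : Claim_equal_memCount := by
  intro line _
  unfold Spec_memCount memCount memCount_alt
  rw [aLoop_eq, bLoop_eq _ ((PySem.Chars.stripChars line.toList ['"']).length + 1) 0 0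
    (by omega) (by omega)]
  simp
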